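-- pv_equiv track=rewrite | github.com/Zhaopudark/Mri-Trans-Gan | models/blocks/vgg.py | _sort_indicators
-- ===== SOURCE A (Python) =====
-- from typing import List,Union,Tuple,Iterable
--
-- def _sort_indicators(indicators:Tuple[Tuple,...]):
--     """
--     sort indicators (a 2D tuple of integer)
--     additionally, give out a sorted set of all elements in the indicators
--     """
--     indicators_buf = []
--     element_set = set()
--     for indicator in indicators:
--         indicators_buf.append(tuple(sorted(indicator)))
--         for item in indicator:
--             element_set.add(item)
--     return tuple(indicators_buf),sorted(element_set)
-- ===== SOURCE B (Python) =====
-- def _merge(xs, ys):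
--     # merge two already-sorted lists
--     out = []
--     i = j = 0
--     while i < len(xs) and j < len(ys):
--         if xs[i] <= ys[j]:
--             out.append(xs[i])
--             i += 1
--         else:
--             out.append(ys[j])
--             j += 1
--     return out + list(xs[i:]) + list(ys[j:])
--
-- def _merge_all(lists):
--     # divide-and-conquer merge of already-sorted lists
--     if not lists:
--         return []
--     if len(lists) == 1:
--         return list(lists[0])
--     mid = len(lists) // 2
--     return _merge(_merge_all(lists[:mid]), _merge_all(lists[mid:]))
--
-- def _sort_indicators(indicators):
--     rows = [tuple(sorted(ind)) for ind in indicators]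
--     merged = _merge_all(rows)
--     uniq = []
--     for v in merged:
--         if not uniq or uniq[-1] != v:
--             uniq.append(v)
--     return tuple(rows), uniq
-- ===== Notes on version B (the rewrite author's own statement) =====
-- stated objective: alternative
-- what changed: B builds the sorted rows with a map and obtains the sorted unique union by divide-and-conquer merging of the already-sorted rows followed by collapsing consecutive duplicates, instead of A's accumulating every element into a hash set and sorting it at the end.
import Mathlib
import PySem

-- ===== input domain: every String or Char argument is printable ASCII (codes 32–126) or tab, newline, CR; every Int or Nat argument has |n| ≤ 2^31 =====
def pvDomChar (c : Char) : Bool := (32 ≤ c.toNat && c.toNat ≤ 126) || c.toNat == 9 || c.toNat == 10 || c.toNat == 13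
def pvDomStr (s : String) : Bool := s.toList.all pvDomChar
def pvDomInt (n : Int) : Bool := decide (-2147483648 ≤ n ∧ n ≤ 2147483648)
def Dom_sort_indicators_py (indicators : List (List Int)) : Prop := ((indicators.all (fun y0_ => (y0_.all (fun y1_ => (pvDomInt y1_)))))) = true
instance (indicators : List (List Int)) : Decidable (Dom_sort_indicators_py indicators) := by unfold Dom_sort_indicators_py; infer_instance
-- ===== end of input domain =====

-- B replaces A's hash-set-plus-final-sort by merging the already-sorted rows pairwise and
-- collapsing consecutive duplicates (objective: alternative algorithm, no speed claim).

-- ===== PORT A =====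
def sort_indicators_py (indicators : List (List Int)) : List (List Int) × List Int :=
  let st := indicators.foldl
    (fun (acc : List (List Int) × PySem.Set Int) indicator =>
      (acc.1 ++ [PySem.List.sorted indicator (fun x => x) false],
       indicator.foldl (fun s item => PySem.Set.add s item) acc.2))
    ([], PySem.Set.empty)
  (st.1, PySem.List.sorted st.2 (fun x => x) false)

-- ===== PORT B =====
-- while i < len(xs) and j < len(ys): append the smaller of xs[i], ys[j]; then out + xs[i:] + ys[j:]
-- (fuel is only totality bookkeeping; every call supplies enough fuel for the whole loop/recursion)
def pvMergeAux (xs ys out : List Int) (i j : Nat) : Nat → List Int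
  | 0 => out ++ PySem.List.slice xs (some (i : Int)) none ++ PySem.List.slice ys (some (j : Int)) none
  | fuel + 1 =>
    if h : i < xs.length ∧ j < ys.length then
      if xs[i] ≤ ys[j] then pvMergeAux xs ys (out ++ [xs[i]]) (i + 1) j fuel
      else pvMergeAux xs ys (out ++ [ys[j]]) i (j + 1) fuel
    else
      out ++ PySem.List.slice xs (some (i : Int)) none ++ PySem.List.slice ys (some (j : Int)) none

-- divide-and-conquer merge of already-sorted lists
def pvMergeAll : Nat → List (List Int) → List Int
  | 0, _ => []
  | _ + 1, [] => []
  | _ + 1, [l] => l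
  | fuel + 1, l1 :: l2 :: rest =>
      let lists := l1 :: l2 :: rest
      let mid := lists.length / 2
      let left := pvMergeAll fuel (PySem.List.slice lists none (some (mid : Int)))
      let right := pvMergeAll fuel (PySem.List.slice lists (some (mid : Int)) none)
      pvMergeAux left right [] 0 0 (left.length + right.length)

def sort_indicators_py_alt (indicators : List (List Int)) : List (List Int) × List Int :=
  let rows := indicators.map (fun ind => PySem.List.sorted ind (fun x => x) false)
  let merged := pvMergeAll rows.length rows
  let uniq := merged.foldl
    (fun u v => if u = [] ∨ PySem.List.pyGet? u (-1) ≠ some v then u ++ [v] else u) []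
  (rows, uniq)

-- ===== PRECONDITION & SPEC =====
def Spec_sort_indicators_py (indicators : List (List Int)) (out : List (List Int) × List Int) : Prop := out = sort_indicators_py_alt indicators
instance (indicators : List (List Int)) (out : List (List Int) × List Int) : Decidable (Spec_sort_indicators_py indicators out) := by unfold Spec_sort_indicators_py; infer_instance

-- ===== CLAIM (what is proved, stated in full; the proofs are below) =====
def Claim_equal_sort_indicators_py : Prop := ∀ (indicators : List (List Int)), Dom_sort_indicators_py indicators → Spec_sort_indicators_py indicators (sort_indicators_py indicators)

-- ===== LEMMAS AND PROOFS =====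

-- plain two-way merge, for reasoning about pvMergeAux
def pvMrg : List Int → List Int → List Int
  | [], ys => ys
  | x :: xs', [] => x :: xs'
  | x :: xs', y :: ys' =>
      if x ≤ y then x :: pvMrg xs' (y :: ys') else y :: pvMrg (x :: xs') ys'
termination_by xs ys => xs.length + ys.length

theorem pvMergeAux_eq (xs ys : List Int) (fuel : Nat) (out : List Int) (i j : Nat)
    (hf : (xs.length - i) + (ys.length - j) ≤ fuel) :
    pvMergeAux xs ys out i j fuel = out ++ pvMrg (xs.drop i) (ys.drop j) := by
  induction fuel generalizing out i j with
  | zero =>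
      have hi : xs.length ≤ i := by omega
      have hj : ys.length ≤ j := by omega
      rw [pvMergeAux, PySem.List.slice_from_natCast, PySem.List.slice_from_natCast,
        List.drop_of_length_le hi, List.drop_of_length_le hj, pvMrg]
      simp
  | succ fuel ih =>
      rw [pvMergeAux]
      by_cases h : i < xs.length ∧ j < ys.length
      · rw [dif_pos h]
        by_cases hle : xs[i] ≤ ys[j]
        · rw [if_pos hle, ih (out ++ [xs[i]]) (i + 1) j (by omega),
            List.drop_eq_getElem_cons h.1, List.drop_eq_getElem_cons h.2, pvMrg]
          simp [hle]
        · rw [if_neg hle, ih (out ++ [ys[j]]) i (j + 1) (by omega),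
            List.drop_eq_getElem_cons h.1, List.drop_eq_getElem_cons h.2, pvMrg]
          simp [hle]
      · rw [dif_neg h, PySem.List.slice_from_natCast, PySem.List.slice_from_natCast]
        rcases Nat.lt_or_ge i xs.length with hi | hi
        · have hj : ys.length ≤ j := by omega
          rw [List.drop_eq_getElem_cons hi, List.drop_of_length_le hj, pvMrg]
          simp
        · rw [List.drop_of_length_le hi, pvMrg]
          simp

theorem mem_pvMrg (xs ys : List Int) (a : Int) : a ∈ pvMrg xs ys ↔ a ∈ xs ∨ a ∈ ys := by
  fun_induction pvMrg xs ys with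
  | case1 ys => simp
  | case2 x xs' => simp
  | case3 x xs' y ys' h ih => simp [ih]; tauto
  | case4 x xs' y ys' h ih => simp [ih]; tauto

theorem pairwise_pvMrg (xs ys : List Int) (hx : xs.Pairwise (· ≤ ·)) (hy : ys.Pairwise (· ≤ ·)) :
    (pvMrg xs ys).Pairwise (· ≤ ·) := by
  fun_induction pvMrg xs ys with
  | case1 ys => simpa [pvMrg]
  | case2 x xs' => exact hx
  | case3 x xs' y ys' h ih =>
      rw [List.pairwise_cons] at hx ⊢
      refine ⟨?_, ih hx.2 hy⟩
      intro b hb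
      rw [mem_pvMrg] at hb
      rcases hb with hb | hb
      · exact hx.1 b hb
      · rcases List.mem_cons.mp hb with rfl | hb
        · exact h
        · rw [List.pairwise_cons] at hy
          exact le_trans h (hy.1 b hb)
  | case4 x xs' y ys' h ih =>
      rw [List.pairwise_cons] at hy ⊢
      refine ⟨?_, ih hx hy.2⟩
      intro b hb
      rw [mem_pvMrg] at hb
      rcases hb with hb | hb
      · rcases List.mem_cons.mp hb with rfl | hb
        · omega
        · rw [List.pairwise_cons] at hx
          exact le_trans (by omega) (hx.1 b hb)
      · exact hy.1 b hb

-- the divide-and-conquer merge of sorted rows: sorted output, members = union of the rows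
theorem pvMergeAll_spec (fuel : Nat) (lists : List (List Int)) (h : lists.length ≤ fuel)
    (hs : ∀ r ∈ lists, r.Pairwise (· ≤ ·)) :
    (pvMergeAll fuel lists).Pairwise (· ≤ ·)
    ∧ ∀ a, (a ∈ pvMergeAll fuel lists ↔ ∃ r ∈ lists, a ∈ r) := by
  induction fuel generalizing lists with
  | zero =>
      have : lists = [] := List.length_eq_zero_iff.mp (by omega)
      subst this
      simp [pvMergeAll]
  | succ fuel ih =>
      match lists with
      | [] => simp [pvMergeAll]
      | [l] =>
          refine ⟨hs l (by simp), ?_⟩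
          simp [pvMergeAll]
      | l1 :: l2 :: rest =>
          rw [pvMergeAll]
          simp only [PySem.List.slice_to_natCast, PySem.List.slice_from_natCast]
          set lists := l1 :: l2 :: rest with hl
          set mid := lists.length / 2 with hm
          have hlen : 2 ≤ lists.length := by simp [hl]
          have hmid1 : 1 ≤ mid := by omega
          have hmid2 : mid ≤ lists.length - 1 := by omega
          have htl : (lists.take mid).length ≤ fuel := by
            rw [List.length_take]; omega
          have hdl : (lists.drop mid).length ≤ fuel := by
            rw [List.length_drop]; omega
          have hst : ∀ r ∈ lists.take mid, r.Pairwise (· ≤ ·) :=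
            fun r hr => hs r (List.mem_of_mem_take hr)
          have hsd : ∀ r ∈ lists.drop mid, r.Pairwise (· ≤ ·) :=
            fun r hr => hs r (List.mem_of_mem_drop hr)
          obtain ⟨hlp, hlm⟩ := ih (lists.take mid) htl hst
          obtain ⟨hrp, hrm⟩ := ih (lists.drop mid) hdl hsd
          rw [pvMergeAux_eq _ _ _ [] 0 0 (by omega)]
          simp only [List.drop_zero, List.nil_append]
          refine ⟨pairwise_pvMrg _ _ hlp hrp, fun a => ?_⟩
          rw [mem_pvMrg, hlm a, hrm a]
          constructor
          · rintro (⟨r, hr, ha⟩ | ⟨r, hr, ha⟩)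
            · exact ⟨r, List.mem_of_mem_take hr, ha⟩
            · exact ⟨r, List.mem_of_mem_drop hr, ha⟩
          · rintro ⟨r, hr, ha⟩
            rw [← List.take_append_drop mid lists, List.mem_append] at hr
            rcases hr with hr | hr
            · exact Or.inl ⟨r, hr, ha⟩
            · exact Or.inr ⟨r, hr, ha⟩

-- every element of a strictly increasing list is ≤ its last element
theorem le_getLast_of_pairwise_lt (acc : List Int) (a l : Int)
    (hp : acc.Pairwise (· < ·)) (ha : a ∈ acc) (hl : acc.getLast? = some l) : a ≤ l := by
  induction acc with
  | nil => cases ha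
  | cons x rest ih =>
      rw [List.pairwise_cons] at hp
      cases rest with
      | nil =>
          simp at ha hl; omega
      | cons y t =>
          rw [List.getLast?_cons_cons] at hl
          rcases List.mem_cons.mp ha with rfl | ha
          · have hlm : l ∈ y :: t := List.mem_of_getLast? hl
            exact le_of_lt (hp.1 l hlm)
          · exact ih hp.2 ha hl

-- the dedupe fold: strictly increasing output, same members as acc ∪ xs
theorem dedupe_inv (xs : List Int) (acc : List Int)
    (hacc : acc.Pairwise (· < ·)) (hxs : xs.Pairwise (· ≤ ·))
    (hle : ∀ a ∈ acc, ∀ b ∈ xs, a ≤ b) :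
    (xs.foldl (fun u v => if u = [] ∨ u.getLast? ≠ some v then u ++ [v] else u) acc).Pairwise (· < ·)
    ∧ ∀ a, (a ∈ xs.foldl (fun u v => if u = [] ∨ u.getLast? ≠ some v then u ++ [v] else u) acc
            ↔ a ∈ acc ∨ a ∈ xs) := by
  induction xs generalizing acc with
  | nil => simpa
  | cons v t ih =>
      rw [List.pairwise_cons] at hxs
      simp only [List.foldl_cons]
      by_cases h : acc.getLast? = some v
      · have hv : v ∈ acc := List.mem_of_getLast? h
        have hcond : ¬ (acc = [] ∨ acc.getLast? ≠ some v) := by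
          rintro (rfl | hne)
          · simp at h
          · exact hne h
        rw [if_neg hcond]
        obtain ⟨h1, h2⟩ := ih acc hacc hxs.2 (fun a ha b hb => hle a ha b (by simp [hb]))
        refine ⟨h1, fun a => ?_⟩
        rw [h2 a]
        constructor
        · rintro (ha | ha)
          · exact Or.inl ha
          · exact Or.inr (by simp [ha])
        · rintro (ha | ha)
          · exact Or.inl ha
          · rcases List.mem_cons.mp ha with rfl | ha
            · exact Or.inl hv
            · exact Or.inr ha
      · have hcond : acc = [] ∨ acc.getLast? ≠ some v := by
          by_cases hn : acc = []
          · exact Or.inl hn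
          · exact Or.inr h
        rw [if_pos hcond]
        have hacc' : (acc ++ [v]).Pairwise (· < ·) := by
          rw [List.pairwise_append]
          refine ⟨hacc, by simp, ?_⟩
          intro a ha b hb
          rcases List.mem_singleton.mp hb with rfl
          have hav : a ≤ b := hle a ha b (by simp)
          rcases lt_or_eq_of_le hav with hlt | rfl
          · exact hlt
          · -- a = v ∈ acc: then getLast? acc = some l with a ≤ l and l ≤ v, so l = v, contradiction
            exfalso
            have hne : acc ≠ [] := by rintro rfl; cases ha
            obtain ⟨l, hl⟩ := List.getLast?_isSome.mpr hne |> Option.isSome_iff_exists.mp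
            have h1 : a ≤ l := le_getLast_of_pairwise_lt acc a l hacc ha hl
            have h2 : l ≤ a := hle l (List.mem_of_getLast? hl) a (by simp)
            have : l = a := by omega
            exact h (this ▸ hl)
        have hle' : ∀ a ∈ acc ++ [v], ∀ b ∈ t, a ≤ b := by
          intro a ha b hb
          rcases List.mem_append.mp ha with ha | ha
          · exact hle a ha b (by simp [hb])
          · rcases List.mem_singleton.mp ha with rfl
            exact hxs.1 b hb
        obtain ⟨h1, h2⟩ := ih (acc ++ [v]) hacc' hxs.2 hle'
        refine ⟨h1, fun a => ?_⟩
        rw [h2 a]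
        simp [List.mem_append, List.mem_cons]
        tauto

-- splitting A's pair-state fold
theorem foldA_split (indicators : List (List Int)) (l : List (List Int)) (s : PySem.Set Int) :
    indicators.foldl
      (fun (acc : List (List Int) × PySem.Set Int) indicator =>
        (acc.1 ++ [PySem.List.sorted indicator (fun x => x) false],
         indicator.foldl (fun s item => PySem.Set.add s item) acc.2)) (l, s)
    = (l ++ indicators.map (fun ind => PySem.List.sorted ind (fun x => x) false),
       indicators.flatten.foldl (fun s item => PySem.Set.add s item) s) := by
  induction indicators generalizing l s with
  | nil => simp
  | cons ind rest ih =>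
      simp only [List.foldl_cons, List.map_cons, List.flatten_cons, List.foldl_append]
      rw [ih]
      simp

-- ===== VERDICT (by name: the statement is the Claim_ definition above) =====
theorem sort_indicators_py_spec : Claim_equal_sort_indicators_py := by
  intro indicators _
  unfold Spec_sort_indicators_py sort_indicators_py sort_indicators_py_alt
  simp only [foldA_split, List.nil_append]
  refine Prod.ext rfl ?_
  -- second components
  have hset : indicators.flatten.foldl (fun s item => PySem.Set.add s item) PySem.Set.empty
      = PySem.Set.ofList indicators.flatten := rfl
  rw [hset]
  -- rows
  set rows := indicators.map (fun ind => PySem.List.sorted ind (fun x => x) false) with hrows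
  obtain ⟨hmp, hmm'⟩ := pvMergeAll_spec rows.length rows le_rfl (by
    intro r hr
    rw [hrows, List.mem_map] at hr
    obtain ⟨ind, _, rfl⟩ := hr
    exact PySem.List.sorted_pairwise ind (fun x => x))
  set merged := pvMergeAll rows.length rows with hmerged
  have hmm : ∀ a, a ∈ merged ↔ a ∈ indicators.flatten := by
    intro a
    rw [hmerged, hmm' a]
    simp only [hrows, List.mem_map, List.mem_flatten]
    constructor
    · rintro ⟨r, ⟨ind, hind, rfl⟩, ha⟩
      exact ⟨ind, hind, (PySem.List.mem_sorted ind _ false a).mp ha⟩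
    · rintro ⟨ind, hind, ha⟩
      exact ⟨_, ⟨ind, hind, rfl⟩, (PySem.List.mem_sorted ind _ false a).mpr ha⟩
  have hfun : (merged.foldl (fun u v => if u = [] ∨ PySem.List.pyGet? u (-1) ≠ some v then u ++ [v] else u) [])
      = merged.foldl (fun u v => if u = [] ∨ u.getLast? ≠ some v then u ++ [v] else u) [] := by
    simp only [PySem.List.pyGet?_neg_one]
  obtain ⟨hup, hum⟩ := dedupe_inv merged [] (by simp) hmp (by simp)
  rw [hfun]
  apply PySem.List.sorted_eq_of_perm_of_pairwise_lt
  · rw [List.perm_ext_iff_of_nodup (hup.imp ne_of_lt) (PySem.Set.nodup_ofList _)]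
    intro a
    rw [hum a, PySem.Set.mem_ofList]
    simp [hmm a]
  · exact hup
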